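-- pv_equiv track=rewrite | github.com/simplestaking/trezor-firmware | core/src/apps/polkadot/helpers.py | get_byte_count
-- ===== SOURCE A (Python) =====
-- def get_byte_count(val: int):
--     if val == 0:
--         return 1
--     elif val > 0:
--         count = 0
--         while val != 0:
--             val >>= 8
--             count += 1
--         return count
-- ===== SOURCE B (Python) =====
-- def get_byte_count(val: int):
--     if val == 0:
--         return 1
--     elif val > 0:
--         return (val.bit_length() + 7) // 8
-- ===== Notes on version B (the rewrite author's own statement) =====
-- stated objective: idiomatic
-- what changed: Replaces the iterative shift-by-8-and-count loop with the closed form (val.bit_length() + 7) // 8.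
-- outside the precondition, e.g. on get_byte_count(-1): A returns None, B returns None
import Mathlib
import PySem

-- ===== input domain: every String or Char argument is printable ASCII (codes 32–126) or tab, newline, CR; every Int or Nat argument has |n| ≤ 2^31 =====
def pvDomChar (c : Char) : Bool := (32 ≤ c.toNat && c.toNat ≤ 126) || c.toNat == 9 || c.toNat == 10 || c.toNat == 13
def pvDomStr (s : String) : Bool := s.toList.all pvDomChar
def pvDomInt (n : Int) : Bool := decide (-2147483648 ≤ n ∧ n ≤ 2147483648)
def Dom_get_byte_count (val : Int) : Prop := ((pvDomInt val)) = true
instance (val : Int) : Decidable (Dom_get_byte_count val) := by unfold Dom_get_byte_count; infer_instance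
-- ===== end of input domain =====

-- B replaces A's shift-by-8-and-count loop with the closed form (val.bit_length() + 7) // 8 (idiomatic).


-- ===== PORT A =====
-- the 'while val != 0: val >>= 8; count += 1' loop; only reached with val > 0, so it runs on val.toNat
def pvLoopA (n : Nat) (count : Int) : Int :=
  if n = 0 then count else pvLoopA (n / 256) (count + 1)
termination_by n
decreasing_by exact Nat.div_lt_self (by omega) (by norm_num)

def get_byte_count (val : Int) : Int :=
  if val = 0 then 1
  else if val > 0 then pvLoopA val.toNat 0
  else 0  -- unreachable under Pre_: Python A falls through and returns None here

-- ===== PORT B =====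
-- (val.bit_length() + 7) // 8; for val > 0, bit_length = log2 val + 1
def get_byte_count_alt (val : Int) : Int :=
  if val = 0 then 1
  else if val > 0 then PySem.Int.floordiv ((Int.ofNat (val.toNat.log2 + 1)) + 7) 8
  else 0  -- unreachable under Pre_: Python B falls through and returns None here

-- ===== PRECONDITION & SPEC =====
-- Pre_ excludes negative val, on which A (and B) fall off the end and return None, not an int.
def Pre_get_byte_count (val : Int) : Prop := 0 ≤ val
instance (val : Int) : Decidable (Pre_get_byte_count val) := by unfold Pre_get_byte_count; infer_instance
def pvWitness_get_byte_count : Int := (300)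
def Spec_get_byte_count (val : Int) (out : Int) : Prop := out = get_byte_count_alt val
instance (val : Int) (out : Int) : Decidable (Spec_get_byte_count val out) := by unfold Spec_get_byte_count; infer_instance

-- ===== CLAIM (what is proved, stated in full; the proofs are below) =====
def Claim_equal_get_byte_count : Prop := ∀ (val : Int), Dom_get_byte_count val → Pre_get_byte_count val → Spec_get_byte_count val (get_byte_count val)

-- ===== LEMMAS AND PROOFS =====

-- the loop counts base-256 digits: log2 n / 8 + 1 of them for n > 0
theorem pvLoopA_eq (n : Nat) : ∀ c : Int, 0 < n → pvLoopA n c = c + (↑(n.log2 / 8) + 1) := by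
  induction n using Nat.strong_induction_on with
  | _ n ih =>
    intro c hn
    have hne : n ≠ 0 := by omega
    rw [pvLoopA]
    simp only [hne, if_false]
    by_cases h : n < 256
    · have h0 : n / 256 = 0 := Nat.div_eq_of_lt h
      rw [h0, pvLoopA]
      have : n.log2 ≤ 7 := by
        have := (Nat.log2_lt (by omega)).mpr (lt_of_lt_of_le h (by norm_num : (256:ℕ) ≤ 2^8))
        omega
      have : n.log2 / 8 = 0 := Nat.div_eq_of_lt (by omega)
      simp [this]
    · have h256 : 256 ≤ n := by omega
      have hpos : 0 < n / 256 := Nat.div_pos h256 (by norm_num)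
      rw [ih (n / 256) (Nat.div_lt_self hn (by norm_num)) (c + 1) hpos]
      have hlog : (n / 256).log2 = n.log2 - 8 := by
        have : n / 256 = n / 2^8 := by norm_num
        rw [this, Nat.log2_eq_log_two, Nat.log2_eq_log_two, Nat.log_div_base_pow]
      have hge : 8 ≤ n.log2 := by
        rw [Nat.le_log2 (by omega)]
        calc (2:ℕ)^8 = 256 := by norm_num
        _ ≤ n := h256
      rw [hlog]
      have : (n.log2 - 8) / 8 + 1 = n.log2 / 8 := by omega
      push_cast [← this]
      ring

-- ===== VERDICT (by name: the statement is the Claim_ definition above) =====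
theorem get_byte_count_spec : Claim_equal_get_byte_count := by
  intro val _ hpre
  unfold Spec_get_byte_count get_byte_count get_byte_count_alt
  by_cases h0 : val = 0
  · simp [h0]
  · have hpos : val > 0 := lt_of_le_of_ne hpre (Ne.symm h0)
    simp only [h0, hpos, if_pos, if_false]
    have hn : 0 < val.toNat := by omega
    rw [pvLoopA_eq _ 0 hn]
    have : PySem.Int.floordiv ((Int.ofNat (val.toNat.log2 + 1)) + 7) 8
        = ↑((val.toNat.log2 + 8) / 8) := by
      simp [PySem.Int.floordiv, Int.fdiv_eq_ediv]
      omega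
    rw [this]
    have : (val.toNat.log2 + 8) / 8 = val.toNat.log2 / 8 + 1 := by omega
    rw [this]
    push_cast
    ring
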